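-- pv_equiv track=rewrite | github.com/2533757653/myoriginalprogram | 数据分析计划/methods.py | sortsanwei
-- ===== SOURCE A (Python) =====
-- def jiexi(a):
--     return a[1]
--
-- def sortsanwei(x,y):
--     zonghe=[]#x 表示厂商，y表示数量
--     x1=[]
--     y1=[]
--     for i,q in zip(x,y):
--         zonghe.append([i,q])
--     zonghe=sorted(zonghe,key=jiexi,reverse=True)
--     for i in zonghe:
--         y1.append(i[1])
--         x1.append(i[0])
--     return x1,y1
-- ===== SOURCE B (Python) =====
-- def sortsanwei(x, y):
--     # online stable insertion sort: build both output lists directly, no pair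
--     # objects and no call to sorted()
--     x1, y1 = [], []
--     for v, c in zip(x, y):
--         k = 0
--         while k < len(y1) and y1[k] >= c:
--             k += 1
--         x1.insert(k, v)
--         y1.insert(k, c)
--     return x1, y1
-- ===== Notes on version B (the rewrite author's own statement) =====
-- stated objective: alternative
-- what changed: B replaces A's build-pairs / library-sort / split-pairs pipeline with an online stable insertion sort: it streams over zip(x,y) once and inserts each vendor and count directly at its final position in the two output lists, never materialising pair objects and never calling sorted().
import Mathlib
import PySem

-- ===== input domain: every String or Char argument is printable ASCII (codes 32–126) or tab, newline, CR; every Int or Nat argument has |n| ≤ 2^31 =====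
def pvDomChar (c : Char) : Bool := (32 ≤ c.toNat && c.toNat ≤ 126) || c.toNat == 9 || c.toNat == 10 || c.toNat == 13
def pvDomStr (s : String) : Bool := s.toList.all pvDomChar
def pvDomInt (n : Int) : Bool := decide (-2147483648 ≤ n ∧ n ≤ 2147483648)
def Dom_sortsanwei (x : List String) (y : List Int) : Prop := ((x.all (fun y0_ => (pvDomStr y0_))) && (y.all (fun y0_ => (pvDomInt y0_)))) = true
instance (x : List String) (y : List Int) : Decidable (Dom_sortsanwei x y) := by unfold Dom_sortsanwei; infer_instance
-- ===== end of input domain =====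

-- B replaces A's build-pairs / library-sort / split-pairs pipeline by an online stable
-- insertion sort that streams over zip(x,y) once and places each vendor and count
-- directly in the two output lists (objective: alternative).

-- ===== PORT A =====
def jiexi (a : String × Int) : Int := a.2

def sortsanwei (x : List String) (y : List Int) : List String × List Int :=
  -- zonghe.append([i,q]) for i,q in zip(x,y)
  let zonghe : List (String × Int) := (x.zip y).foldl (fun acc p => acc ++ [p]) []
  -- zonghe = sorted(zonghe, key=jiexi, reverse=True)
  let zonghe2 := PySem.List.sorted zonghe jiexi true
  -- for i in zonghe: y1.append(i[1]); x1.append(i[0])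
  let r := zonghe2.foldl (fun (st : List String × List Int) p => (st.1 ++ [p.1], st.2 ++ [p.2])) ([], [])
  (r.1, r.2)

-- ===== PORT B =====
-- the 'while k < len(y1) and y1[k] >= c: k += 1' scan
def pvFindK (c : Int) : List Int → Nat
  | [] => 0
  | h :: t => if h ≥ c then pvFindK c t + 1 else 0

def sortsanwei_alt (x : List String) (y : List Int) : List String × List Int :=
  (x.zip y).foldl
    (fun (st : List String × List Int) p =>
      let k := pvFindK p.2 st.2
      (PySem.List.insert st.1 (k : Int) p.1, PySem.List.insert st.2 (k : Int) p.2))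
    ([], [])

-- ===== PRECONDITION & SPEC =====
def Spec_sortsanwei (x : List String) (y : List Int) (out : List String × List Int) : Prop := out = sortsanwei_alt x y
instance (x : List String) (y : List Int) (out : List String × List Int) : Decidable (Spec_sortsanwei x y out) := by unfold Spec_sortsanwei; infer_instance

-- ===== CLAIM (what is proved, stated in full; the proofs are below) =====
def Claim_equal_sortsanwei : Prop := ∀ (x : List String) (y : List Int), Dom_sortsanwei x y → Spec_sortsanwei x y (sortsanwei x y)

-- ===== LEMMAS AND PROOFS =====

-- appending one by one reproduces the list
theorem pvFoldlApp {α : Type} (l : List α) (acc : List α) :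
    l.foldl (fun a p => a ++ [p]) acc = acc ++ l := by
  induction l generalizing acc with
  | nil => simp
  | cons h t ih => simp [List.foldl, ih]

-- the split loop produces (map fst, map snd)
theorem pvFoldlSplit (z : List (String × Int)) (a : List String) (b : List Int) :
    z.foldl (fun (st : List String × List Int) p => (st.1 ++ [p.1], st.2 ++ [p.2])) (a, b)
      = (a ++ z.map Prod.fst, b ++ z.map Prod.snd) := by
  induction z generalizing a b with
  | nil => simp
  | cons h t ih => simp [List.foldl, ih]

theorem pvFindK_le (c : Int) (ys : List Int) : pvFindK c ys ≤ ys.length := by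
  induction ys with
  | nil => simp [pvFindK]
  | cons h t ih => simp only [pvFindK, List.length_cons]; split <;> omega

-- insertBy (reverse order on jiexi) is insertion at the scan position pvFindK
theorem pvInsertByTakeDrop (v : String) (c : Int) (l : List (String × Int)) :
    PySem.List.insertBy (fun a b => decide (jiexi b < jiexi a)) (v, c) l
      = l.take (pvFindK c (l.map Prod.snd)) ++ (v, c) :: l.drop (pvFindK c (l.map Prod.snd)) := by
  induction l with
  | nil => simp [PySem.List.insertBy, pvFindK]
  | cons h t ih =>
      simp only [PySem.List.insertBy, List.map_cons, pvFindK, jiexi]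
      by_cases hc : h.2 ≥ c
      · have : ¬ (h.2 < c) := by omega
        simp only [jiexi] at ih
        simp [hc, this, ih]
      · have : h.2 < c := by omega
        simp [hc, this]

-- one B-step on (l.map fst, l.map snd) is one insertBy step on l, split
theorem pvStep (l : List (String × Int)) (v : String) (c : Int) :
    (PySem.List.insert (l.map Prod.fst) ((pvFindK c (l.map Prod.snd) : Nat) : Int) v,
     PySem.List.insert (l.map Prod.snd) ((pvFindK c (l.map Prod.snd) : Nat) : Int) c)
      = ((PySem.List.insertBy (fun a b => decide (jiexi b < jiexi a)) (v, c) l).map Prod.fst,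
         (PySem.List.insertBy (fun a b => decide (jiexi b < jiexi a)) (v, c) l).map Prod.snd) := by
  have hk := pvFindK_le c (l.map Prod.snd)
  rw [PySem.List.insert_natCast _ _ _ (by simpa using hk),
      PySem.List.insert_natCast _ _ _ (by simpa using hk),
      pvInsertByTakeDrop]
  simp [List.map_take, List.map_drop]

-- B's fold on a split accumulator is the insertBy fold on the pair accumulator, split
theorem pvFoldEq (zs : List (String × Int)) (l : List (String × Int)) :
    zs.foldl
      (fun (st : List String × List Int) p =>
        let k := pvFindK p.2 st.2
        (PySem.List.insert st.1 (k : Int) p.1, PySem.List.insert st.2 (k : Int) p.2))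
      (l.map Prod.fst, l.map Prod.snd)
      = ((zs.foldl (fun acc p => PySem.List.insertBy (fun a b => decide (jiexi b < jiexi a)) p acc) l).map Prod.fst,
         (zs.foldl (fun acc p => PySem.List.insertBy (fun a b => decide (jiexi b < jiexi a)) p acc) l).map Prod.snd) := by
  induction zs generalizing l with
  | nil => rfl
  | cons p t ih =>
      simp only [List.foldl_cons]
      rw [show (let k := pvFindK p.2 (l.map Prod.snd);
            (PySem.List.insert (l.map Prod.fst) (k : Int) p.1, PySem.List.insert (l.map Prod.snd) (k : Int) p.2))
          = ((PySem.List.insertBy (fun a b => decide (jiexi b < jiexi a)) p l).map Prod.fst,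
             (PySem.List.insertBy (fun a b => decide (jiexi b < jiexi a)) p l).map Prod.snd) from pvStep l p.1 p.2]
      exact ih _

-- ===== VERDICT (by name: the statement is the Claim_ definition above) =====
theorem sortsanwei_spec : Claim_equal_sortsanwei := by
  intro x y _
  unfold Spec_sortsanwei sortsanwei sortsanwei_alt
  simp only [pvFoldlApp, List.nil_append, PySem.List.sorted_rev_eq_foldl_insertBy, pvFoldlSplit]
  have := pvFoldEq (x.zip y) []
  simp only [List.map_nil] at this
  simp [this]
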